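-- pv_equiv track=rewrite | github.com/superboysb-12/AgentCompetitionAnalysisPlatform | scripts/rebuild_mineru_pages_text.py | split_units_by_page_reset
-- ===== SOURCE A (Python) =====
-- from typing import Dict, Iterable, List, Optional, Tuple
--
-- def split_units_by_page_reset(units: List[dict]) -> List[List[dict]]:
--     """
--     Split logical documents in original JSON order:
--     - when page_idx jumps from >0 back to 0, start a new logical document.
--     - consecutive 0 values remain in current document.
--     """
--     segments: List[List[dict]] = []
--     current: List[dict] = []
--     prev_page_idx: Optional[int] = None
--
--     for unit in units:
--         page_idx = unit.get("page_idx", 0)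
--         if current and page_idx == 0 and isinstance(prev_page_idx, int) and prev_page_idx > 0:
--             segments.append(current)
--             current = []
--         current.append(unit)
--         prev_page_idx = page_idx
--
--     if current:
--         segments.append(current)
--     return segments
-- ===== SOURCE B (Python) =====
-- from typing import List
--
--
-- def split_units_by_page_reset(units: List[dict]) -> List[List[dict]]:
--     # Two passes: first detect the cut indices (page_idx falling back to 0
--     # after a positive page), then slice the unit list at those boundaries.
--     pages = [u.get("page_idx", 0) for u in units]
--     cuts = [i for i, (prev, cur) in enumerate(zip(pages, pages[1:]), 1)
--             if cur == 0 and isinstance(prev, int) and prev > 0]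
--     segments: List[List[dict]] = []
--     start = 0
--     for c in cuts:
--         segments.append(units[start:c])
--         start = c
--     segments.append(units[start:])
--     return segments if units else []
-- ===== Notes on version B (the rewrite author's own statement) =====
-- stated objective: alternative
-- what changed: A accumulates segments inline in one stateful loop; B first detects the cut indices (page_idx back to 0 after a positive page) in a zip/enumerate pass and then builds the segments by slicing the unit list between consecutive boundaries.
import Mathlib
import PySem

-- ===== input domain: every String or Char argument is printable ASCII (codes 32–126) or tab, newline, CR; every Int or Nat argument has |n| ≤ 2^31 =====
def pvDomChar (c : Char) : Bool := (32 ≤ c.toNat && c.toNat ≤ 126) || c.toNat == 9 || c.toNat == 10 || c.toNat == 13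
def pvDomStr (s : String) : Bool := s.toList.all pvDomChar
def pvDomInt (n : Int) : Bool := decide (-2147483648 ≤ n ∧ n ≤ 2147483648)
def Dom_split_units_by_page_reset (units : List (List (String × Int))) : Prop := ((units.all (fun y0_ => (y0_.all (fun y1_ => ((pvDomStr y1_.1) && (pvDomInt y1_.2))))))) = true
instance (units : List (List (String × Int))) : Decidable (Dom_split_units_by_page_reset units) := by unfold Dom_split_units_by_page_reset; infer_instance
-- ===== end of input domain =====

-- B replaces A's single stateful accumulation loop by boundary detection (cut indices) followed by slicing; alternative decomposition, same O(n) cost.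

-- ===== PORT A =====
-- unit.get("page_idx", 0)
def pageOf (u : List (String × Int)) : Int := (PySem.Dict.mk u).getD "page_idx" 0

-- one iteration of A's for-loop; `isinstance(prev_page_idx, int) and prev_page_idx > 0`
-- is `0 < prev.getD 0` (prev None ↦ default 0, and 0 < 0 is false — exact on Int-valued dicts)
def stepA (st : List (List (List (String × Int))) × List (List (String × Int)) × Option Int)
    (unit : List (String × Int)) :
    List (List (List (String × Int))) × List (List (String × Int)) × Option Int :=
  let page_idx := pageOf unit
  let (segments, current) :=
    if st.2.1 ≠ [] ∧ page_idx = 0 ∧ 0 < (st.2.2).getD 0 then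
      (st.1 ++ [st.2.1], ([] : List (List (String × Int))))
    else (st.1, st.2.1)
  (segments, current ++ [unit], some page_idx)

def split_units_by_page_reset (units : List (List (String × Int))) : List (List (List (String × Int))) :=
  let st := units.foldl stepA ([], [], none)
  if st.2.1 ≠ [] then st.1 ++ [st.2.1] else st.1

-- ===== PORT B =====
-- one iteration of B's slicing loop: segments.append(units[start:c]); start = c
def stepB (units : List (List (String × Int)))
    (acc : List (List (List (String × Int))) × Int) (c : Int) :
    List (List (List (String × Int))) × Int :=
  (acc.1 ++ [PySem.List.slice units (some acc.2) (some c)], c)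

def split_units_by_page_reset_alt (units : List (List (String × Int))) : List (List (List (String × Int))) :=
  let pages := units.map pageOf
  -- cuts = [i for i, (prev, cur) in enumerate(zip(pages, pages[1:]), 1) if cur == 0 and prev > 0]
  -- (the isinstance check is vacuous on Int-valued dicts)
  let cuts := ((PySem.List.enumerate (pages.zip (PySem.List.slice pages (some 1) none)) 1).filter
      (fun ic => decide (ic.2.2 = 0 ∧ 0 < ic.2.1))).map (·.1)
  let st := cuts.foldl (stepB units) ([], 0)
  let segments := st.1 ++ [PySem.List.slice units (some st.2) none]
  if units ≠ [] then segments else []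

-- ===== PRECONDITION & SPEC =====
def Spec_split_units_by_page_reset (units : List (List (String × Int))) (out : List (List (List (String × Int)))) : Prop := out = split_units_by_page_reset_alt units
instance (units : List (List (String × Int))) (out : List (List (List (String × Int)))) : Decidable (Spec_split_units_by_page_reset units out) := by unfold Spec_split_units_by_page_reset; infer_instance

-- ===== CLAIM (what is proved, stated in full; the proofs are below) =====
def Claim_equal_split_units_by_page_reset : Prop := ∀ (units : List (List (String × Int))), Dom_split_units_by_page_reset units → Spec_split_units_by_page_reset units (split_units_by_page_reset units)

-- ===== LEMMAS AND PROOFS =====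

-- common recursive description of the segmentation: goSeg q us = segments of us given that
-- the unit before us had page q; the first returned segment continues the caller's segment.
def goSeg : Int → List (List (String × Int)) → List (List (List (String × Int)))
  | _, [] => [[]]
  | q, u :: rest =>
    if pageOf u = 0 ∧ 0 < q then
      [] :: (u :: (goSeg (pageOf u) rest).headD []) :: (goSeg (pageOf u) rest).tail
    else
      (u :: (goSeg (pageOf u) rest).headD []) :: (goSeg (pageOf u) rest).tail

-- A's trailing `if current: segments.append(current)`
def finishA (st : List (List (List (String × Int))) × List (List (String × Int)) × Option Int) :
    List (List (List (String × Int))) :=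
  if st.2.1 ≠ [] then st.1 ++ [st.2.1] else st.1

lemma A_inv (us : List (List (String × Int))) :
    ∀ (segs : List (List (List (String × Int)))) (cur : List (List (String × Int))) (q : Int),
      cur ≠ [] →
      finishA (us.foldl stepA (segs, cur, some q)) =
        segs ++ (cur ++ (goSeg q us).headD []) :: (goSeg q us).tail := by
  induction us with
  | nil => intro segs cur q hcur; simp [finishA, goSeg, hcur]
  | cons u rest ih =>
    intro segs cur q hcur
    by_cases h : pageOf u = 0 ∧ 0 < q
    · have hstep : stepA (segs, cur, some q) u = (segs ++ [cur], [u], some (pageOf u)) := by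
        simp [stepA, hcur, h.1, h.2]
      simp only [List.foldl_cons, hstep]
      rw [ih (segs ++ [cur]) [u] (pageOf u) (by simp)]
      simp [goSeg, h, List.append_assoc]
    · have hstep : stepA (segs, cur, some q) u = (segs, cur ++ [u], some (pageOf u)) := by
        simp [stepA, h]
      simp only [List.foldl_cons, hstep]
      rw [ih segs (cur ++ [u]) (pageOf u) (by simp)]
      simp [goSeg, h, List.append_assoc]

lemma A_nil : split_units_by_page_reset [] = [] := rfl

lemma A_cons (u : List (String × Int)) (rest : List (List (String × Int))) :
    split_units_by_page_reset (u :: rest) = goSeg 0 (u :: rest) := by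
  have hstep : stepA ([], [], none) u = ([], [u], some (pageOf u)) := by simp [stepA]
  have : split_units_by_page_reset (u :: rest) =
      finishA ((u :: rest).foldl stepA ([], [], none)) := rfl
  rw [this]
  simp only [List.foldl_cons, hstep]
  rw [A_inv rest [] [u] (pageOf u) (by simp)]
  simp [goSeg]

-- cut positions inside us (position 0 = cut before the first unit), given previous page q
def cutsU : Int → List (List (String × Int)) → List Nat
  | _, [] => []
  | q, u :: rest =>
    (if pageOf u = 0 ∧ 0 < q then [0] else []) ++ (cutsU (pageOf u) rest).map (· + 1)

-- Nat-index version of B's slicing loop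
def nAux (xs : List (List (String × Int))) (segs : List (List (List (String × Int)))) (s : Nat) :
    List Nat → List (List (List (String × Int)))
  | [] => segs ++ [xs.drop s]
  | c :: cs => nAux xs (segs ++ [(xs.drop s).take (c - s)]) c cs

-- Int-index version, literally B's slices
def bAux (xs : List (List (String × Int))) (segs : List (List (List (String × Int)))) (s : Int) :
    List Int → List (List (List (String × Int)))
  | [] => segs ++ [PySem.List.slice xs (some s) none]
  | c :: cs => bAux xs (segs ++ [PySem.List.slice xs (some s) (some c)]) c cs

lemma portB_foldl (xs : List (List (String × Int))) :
    ∀ (cs : List Int) (segs : List (List (List (String × Int)))) (s : Int),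
      (cs.foldl (stepB xs) (segs, s)).1 ++
        [PySem.List.slice xs (some (cs.foldl (stepB xs) (segs, s)).2) none] = bAux xs segs s cs := by
  intro cs
  induction cs with
  | nil => intro segs s; simp [bAux]
  | cons c cs ih => intro segs s; simp only [List.foldl_cons, stepB, bAux]; exact ih _ _

lemma bAux_cast (xs : List (List (String × Int))) :
    ∀ (ns : List Nat) (segs : List (List (List (String × Int)))) (s : Nat),
      bAux xs segs (s : Int) (ns.map (fun k : Nat => (k : Int))) = nAux xs segs s ns := by
  intro ns
  induction ns with
  | nil => intro segs s; simp [bAux, nAux, PySem.List.slice_from_natCast]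
  | cons n ns ih =>
    intro segs s
    simp only [List.map_cons, bAux, nAux, PySem.List.slice_natCast]
    exact ih _ _

lemma nAux_append (xs : List (List (String × Int))) :
    ∀ (ns : List Nat) (segs : List (List (List (String × Int)))) (s : Nat),
      nAux xs segs s ns = segs ++ nAux xs [] s ns := by
  intro ns
  induction ns with
  | nil => intro segs s; simp [nAux]
  | cons n ns ih =>
    intro segs s
    simp only [nAux, List.nil_append]
    rw [ih (segs ++ [(xs.drop s).take (n - s)]) n, ih [(xs.drop s).take (n - s)] n]
    simp

lemma nAux_shift (u : List (String × Int)) (xs : List (List (String × Int))) :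
    ∀ (ns : List Nat) (segs : List (List (List (String × Int)))) (s : Nat),
      nAux (u :: xs) segs (s + 1) (ns.map (· + 1)) = nAux xs segs s ns := by
  intro ns
  induction ns with
  | nil => intro segs s; simp [nAux]
  | cons n ns ih =>
    intro segs s
    simp only [List.map_cons, nAux, List.drop_succ_cons, Nat.succ_sub_succ]
    exact ih _ _

lemma consHeadL (u : List (String × Int)) (xs : List (List (String × Int))) (ns : List Nat) :
    nAux (u :: xs) [] 0 (ns.map (· + 1)) =
      (u :: (nAux xs [] 0 ns).headD []) :: (nAux xs [] 0 ns).tail := by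
  cases ns with
  | nil => simp [nAux]
  | cons n ns =>
    simp only [List.map_cons, nAux, List.drop_zero, Nat.sub_zero, List.take_succ_cons,
      List.nil_append]
    rw [nAux_append (u :: xs) (ns.map (· + 1)) [u :: xs.take n] (n + 1),
        nAux_shift u xs ns [] n,
        nAux_append xs ns [xs.take n] n]
    simp

lemma nAux_cutsU : ∀ (us : List (List (String × Int))) (q : Int),
    nAux us [] 0 (cutsU q us) = goSeg q us := by
  intro us
  induction us with
  | nil => intro q; simp [cutsU, nAux, goSeg]
  | cons u rest ih =>
    intro q
    by_cases h : pageOf u = 0 ∧ 0 < q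
    · simp only [cutsU, if_pos h, List.singleton_append, nAux, List.drop_zero, Nat.sub_zero,
        List.take_zero]
      rw [nAux_append (u :: rest) ((cutsU (pageOf u) rest).map (· + 1)) ([] ++ [[]]) 0,
          consHeadL u rest (cutsU (pageOf u) rest), ih (pageOf u)]
      simp [goSeg, h]
    · simp only [cutsU, if_neg h, List.nil_append]
      rw [consHeadL u rest (cutsU (pageOf u) rest), ih (pageOf u)]
      simp [goSeg, h]

lemma cast_succ_comm (l : List Nat) (s : Int) :
    (l.map (· + 1)).map (fun k : Nat => (k : Int) + s) = l.map (fun k : Nat => (k : Int) + (s + 1)) := by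
  rw [List.map_map]
  apply List.map_congr_left
  intro a _
  simp only [Function.comp]
  push_cast
  ring

lemma cast_succ (l : List Nat) :
    (l.map (· + 1)).map (fun k : Nat => (k : Int)) = l.map (fun k : Nat => (k : Int) + 1) := by
  rw [List.map_map]
  apply List.map_congr_left
  intro a _
  simp only [Function.comp]
  push_cast
  ring

lemma cutsE : ∀ (rest : List (List (String × Int))) (q s : Int),
    ((PySem.List.enumerate ((q :: rest.map pageOf).zip (rest.map pageOf)) s).filter
        (fun ic => decide (ic.2.2 = 0 ∧ 0 < ic.2.1))).map (·.1)
      = (cutsU q rest).map (fun k : Nat => (k : Int) + s) := by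
  intro rest
  induction rest with
  | nil => intro q s; simp [cutsU, List.zip_nil_right, PySem.List.enumerate_nil]
  | cons u rest ih =>
    intro q s
    simp only [List.map_cons, List.zip_cons_cons, PySem.List.enumerate_cons]
    by_cases h : pageOf u = 0 ∧ 0 < q
    · rw [List.filter_cons_of_pos (by simpa using h)]
      simp only [List.map_cons, cutsU, if_pos h, List.singleton_append]
      rw [ih (pageOf u) (s + 1), cast_succ_comm]
      simp
    · rw [List.filter_cons_of_neg (by simpa using h)]
      rw [ih (pageOf u) (s + 1)]
      simp only [cutsU, if_neg h, List.nil_append]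
      rw [cast_succ_comm]

lemma B_nil : split_units_by_page_reset_alt [] = [] := rfl

lemma B_cons (u : List (String × Int)) (rest : List (List (String × Int))) :
    split_units_by_page_reset_alt (u :: rest) = goSeg 0 (u :: rest) := by
  have hcuts :
      (((PySem.List.enumerate (((u :: rest).map pageOf).zip
            (PySem.List.slice ((u :: rest).map pageOf) (some 1) none)) 1).filter
          (fun ic => decide (ic.2.2 = 0 ∧ 0 < ic.2.1))).map (·.1))
        = (cutsU 0 (u :: rest)).map (fun k : Nat => (k : Int)) := by
    rw [PySem.List.slice_from_one]
    simp only [List.map_cons, List.tail_cons]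
    rw [cutsE rest (pageOf u) 1]
    simp only [cutsU]
    rw [if_neg (by simp : ¬(pageOf u = 0 ∧ (0:Int) < 0)), List.nil_append, cast_succ]
  have hb : split_units_by_page_reset_alt (u :: rest) =
      (let cuts := (((PySem.List.enumerate (((u :: rest).map pageOf).zip
            (PySem.List.slice ((u :: rest).map pageOf) (some 1) none)) 1).filter
          (fun ic => decide (ic.2.2 = 0 ∧ 0 < ic.2.1))).map (·.1))
       let st := cuts.foldl (stepB (u :: rest)) ([], 0)
       st.1 ++ [PySem.List.slice (u :: rest) (some st.2) none]) := by
    simp [split_units_by_page_reset_alt]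
  rw [hb]
  simp only [hcuts]
  have hbc := bAux_cast (u :: rest) (cutsU 0 (u :: rest)) [] 0
  push_cast at hbc
  rw [portB_foldl (u :: rest) ((cutsU 0 (u :: rest)).map (fun k : Nat => (k : Int))) [] 0, hbc,
      nAux_cutsU (u :: rest) 0]

-- ===== VERDICT (by name: the statement is the Claim_ definition above) =====
theorem split_units_by_page_reset_spec : Claim_equal_split_units_by_page_reset := by
  intro units _
  unfold Spec_split_units_by_page_reset
  cases units with
  | nil => rw [A_nil, B_nil]
  | cons u rest => rw [A_cons, B_cons]
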